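-- pv_equiv track=rewrite | github.com/Luketss/PythonFolio | Binary search/vowels_consonants.py | solve
-- ===== SOURCE A (Python) =====
-- def solve(s):
--     vowels = []
--     consonants = []
--     for i in range(0, len(s)):
--         if s[i] == 'a' or s[i] == 'e' or s[i] == 'i' or s[i] == 'o' or s[i] == 'u':
--             vowels.append(s[i])
--         else:
--             consonants.append(s[i])
--     vowels.sort()
--     consonants.sort()
--     return "".join(vowels + consonants)
-- ===== SOURCE B (Python) =====
-- def solve(s):
--     counts = [0] * 128
--     for c in s:
--         counts[ord(c)] += 1
--     vowel_part = []
--     cons_part = []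
--     for code in range(128):
--         ch = chr(code)
--         block = ch * counts[code]
--         if ch in ('a', 'e', 'i', 'o', 'u'):
--             vowel_part.append(block)
--         else:
--             cons_part.append(block)
--     return "".join(vowel_part) + "".join(cons_part)
-- ===== Notes on version B (the rewrite author's own statement) =====
-- stated objective: faster
-- what changed: Replaced partition-then-comparison-sort with a single counting pass over the string and one sweep over the 128-entry ASCII table that emits vowel and consonant runs already in order.
import Mathlib
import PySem

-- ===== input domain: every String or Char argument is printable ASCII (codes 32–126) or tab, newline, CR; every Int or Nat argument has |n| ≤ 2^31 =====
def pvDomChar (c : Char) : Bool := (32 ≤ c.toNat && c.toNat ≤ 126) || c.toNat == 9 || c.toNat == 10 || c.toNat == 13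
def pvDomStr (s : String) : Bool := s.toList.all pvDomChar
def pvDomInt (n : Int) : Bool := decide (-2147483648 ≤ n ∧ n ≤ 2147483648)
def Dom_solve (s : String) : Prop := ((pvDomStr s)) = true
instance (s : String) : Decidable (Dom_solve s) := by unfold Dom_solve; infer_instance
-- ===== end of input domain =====

-- B replaces partition + two comparison sorts with a counting sort over the 128-entry ASCII table (objective: faster, O(n) vs O(n log n)).

-- ===== PORT A =====
def solve (s : String) : String :=
  let cs := s.toList
  let r := (PySem.List.pyRange 0 (PySem.List.len cs) 1).foldl
    (fun (acc : List Char × List Char) i =>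
      let c := PySem.List.pyGetD cs i ' '
      if c = 'a' ∨ c = 'e' ∨ c = 'i' ∨ c = 'o' ∨ c = 'u' then (acc.1 ++ [c], acc.2)
      else (acc.1, acc.2 ++ [c]))
    ([], [])
  String.mk (PySem.List.sorted r.1 (fun x => x) false ++ PySem.List.sorted r.2 (fun x => x) false)

-- ===== PORT B =====
def solve_alt (s : String) : String :=
  let cs := s.toList
  -- counts = [0]*128; for c in s: counts[ord(c)] += 1   (ord(c) < 128 on the claimed domain)
  let counts := cs.foldl
    (fun (counts : List Int) c => counts.set c.toNat (counts.getD c.toNat 0 + 1))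
    (List.replicate 128 0)
  -- for code in range(128): append chr(code)*counts[code] to the vowel or consonant part
  let parts := (List.range 128).foldl
    (fun (acc : List Char × List Char) k =>
      let ch := Char.ofNat k
      let block := List.replicate (counts.getD k 0).toNat ch
      if ch = 'a' ∨ ch = 'e' ∨ ch = 'i' ∨ ch = 'o' ∨ ch = 'u' then (acc.1 ++ block, acc.2)
      else (acc.1, acc.2 ++ block))
    ([], [])
  String.mk (parts.1 ++ parts.2)

-- ===== PRECONDITION & SPEC =====
def Spec_solve (s : String) (out : String) : Prop := out = solve_alt s
instance (s : String) (out : String) : Decidable (Spec_solve s out) := by unfold Spec_solve; infer_instance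

-- ===== CLAIM (what is proved, stated in full; the proofs are below) =====
def Claim_equal_solve : Prop := ∀ (s : String), Dom_solve s → Spec_solve s (solve s)

-- ===== LEMMAS AND PROOFS =====

-- Both loops share this shape: a fold routing a block g x to the first or second component.
theorem foldl_route {α : Type} (p : α → Prop) [DecidablePred p] (g : α → List Char) :
    ∀ (l : List α) (i1 i2 : List Char),
    l.foldl (fun (acc : List Char × List Char) x =>
        if p x then (acc.1 ++ g x, acc.2) else (acc.1, acc.2 ++ g x)) (i1, i2)
      = (i1 ++ l.flatMap (fun x => if p x then g x else []),
         i2 ++ l.flatMap (fun x => if p x then [] else g x)) := by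
  intro l
  induction l with
  | nil => simp
  | cons x t ih =>
    intro i1 i2
    by_cases hx : p x <;> simp [hx, ih]

theorem flatMap_single_filter {α : Type} (p : α → Prop) [DecidablePred p] (l : List α) :
    l.flatMap (fun x => if p x then [x] else []) = l.filter (fun x => decide (p x)) := by
  induction l with
  | nil => rfl
  | cons x t ih => by_cases hx : p x <;> simp [hx, ih]

theorem flatMap_single_filter_not {α : Type} (p : α → Prop) [DecidablePred p] (l : List α) :
    l.flatMap (fun x => if p x then [] else [x]) = l.filter (fun x => !decide (p x)) := by
  induction l with
  | nil => rfl
  | cons x t ih => by_cases hx : p x <;> simp [hx, ih]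

theorem toNat_ofNat_lt (k : Nat) (h : k < 128) : (Char.ofNat k).toNat = k := by
  unfold Char.ofNat; split
  · rfl
  · exact absurd (Or.inl (by omega)) ‹¬ Nat.isValidChar k›

theorem ofNat_eq_iff (c : Char) (k : Nat) (h : k < 128) :
    Char.ofNat k = c ↔ c.toNat = k := by
  constructor
  · intro he; rw [← he, toNat_ofNat_lt k h]
  · intro he; rw [← he, Char.ofNat_toNat]

-- the counter array: entry k holds the number of occurrences of chr(k)
theorem counts_getD (l : List Char) :
    ∀ (counts : List Int), counts.length = 128 → (∀ c ∈ l, c.toNat < 128) →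
    ∀ k, k < 128 →
    (l.foldl (fun (counts : List Int) c => counts.set c.toNat (counts.getD c.toNat 0 + 1)) counts).getD k 0
      = counts.getD k 0 + l.count (Char.ofNat k) := by
  induction l with
  | nil => intro counts _ _ k _; simp
  | cons c t ih =>
    intro counts hlen hmem k hk
    have hc : c.toNat < 128 := hmem c (by simp)
    have hlen' : (counts.set c.toNat (counts.getD c.toNat 0 + 1)).length = 128 := by
      simp [hlen]
    rw [List.foldl_cons, ih _ hlen' (fun x hx => hmem x (by simp [hx])) k hk]
    rw [List.count_cons]
    by_cases he : c.toNat = k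
    · subst he
      rw [List.getD_eq_getElem?_getD, List.getElem?_set_self (by omega), Char.ofNat_toNat]
      simp only [Option.getD_some, beq_self_eq_true, if_true]
      push_cast
      omega
    · have hne : ¬ (c == Char.ofNat k) = true := by
        intro hb
        exact he ((ofNat_eq_iff c k hk).mp (eq_of_beq hb).symm)
      rw [List.getD_eq_getElem?_getD, List.getElem?_set_ne he,
          ← List.getD_eq_getElem?_getD]
      simp [hne]

theorem count_flatMap_blocks (m : List Char) :
    ∀ (ns : List Nat), ns.Pairwise (· < ·) → (∀ k ∈ ns, k < 128) → ∀ c : Char,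
    (ns.flatMap (fun k => List.replicate (m.count (Char.ofNat k)) (Char.ofNat k))).count c
      = if c.toNat ∈ ns then m.count c else 0 := by
  intro ns
  induction ns with
  | nil => simp
  | cons k t ih =>
    intro hpw hlt c
    have hk : k < 128 := hlt k (by simp)
    rw [List.flatMap_cons, List.count_append, List.count_replicate,
        ih hpw.of_cons (fun x hx => hlt x (by simp [hx])) c]
    by_cases he : c.toNat = k
    · have hec : Char.ofNat k = c := (ofNat_eq_iff c k hk).mpr he
      have hnot : c.toNat ∉ t := by
        rw [he]; intro hmem
        exact absurd (List.rel_of_pairwise_cons hpw hmem) (lt_irrefl k)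
      have hkt : k ∉ t := he ▸ hnot
      simp [hec, he, hkt]
    · have hne : ¬ (Char.ofNat k == c) = true := by
        simp [ofNat_eq_iff c k hk]; omega
      simp [hne, he]

theorem pairwise_flatMap_blocks (f : Nat → Nat) :
    ∀ (ns : List Nat), ns.Pairwise (· < ·) → (∀ k ∈ ns, k < 128) →
    (ns.flatMap (fun k => List.replicate (f k) (Char.ofNat k))).Pairwise (· ≤ ·) := by
  intro ns
  induction ns with
  | nil => simp
  | cons k t ih =>
    intro hpw hlt
    rw [List.flatMap_cons]
    rw [List.pairwise_append]
    refine ⟨List.pairwise_replicate.mpr (Or.inr le_rfl),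
            ih hpw.of_cons (fun x hx => hlt x (by simp [hx])), ?_⟩
    intro a ha b hb
    obtain rfl := List.eq_of_mem_replicate ha
    obtain ⟨k', hk't, hb'⟩ := List.mem_flatMap.mp hb
    obtain rfl := List.eq_of_mem_replicate hb'
    have h1 : k < k' := List.rel_of_pairwise_cons hpw hk't
    have h2 : k' < 128 := hlt k' (by simp [hk't])
    show (Char.ofNat k).toNat ≤ (Char.ofNat k').toNat
    rw [toNat_ofNat_lt k (by omega), toNat_ofNat_lt k' h2]
    omega

-- counting sort over the 128-entry table equals Python's sorted on lists of ASCII chars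
theorem counting_sort (m : List Char) (h : ∀ c ∈ m, c.toNat < 128) :
    (List.range 128).flatMap (fun k => List.replicate (m.count (Char.ofNat k)) (Char.ofNat k))
      = PySem.List.sorted m (fun x => x) false := by
  have hpw : (List.range 128).Pairwise (· < ·) := List.pairwise_lt_range
  have hlt : ∀ k ∈ List.range 128, k < 128 := fun k hk => List.mem_range.mp hk
  symm
  apply PySem.List.sorted_id_eq_of_perm_of_pairwise
  · rw [List.perm_iff_count]
    intro c
    rw [count_flatMap_blocks m (List.range 128) hpw hlt c]
    by_cases hc : c.toNat < 128
    · simp [hc]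
    · have : c ∉ m := fun hm => hc (h c hm)
      simp [List.mem_range, hc, List.count_eq_zero.mpr this]
  · exact pairwise_flatMap_blocks _ (List.range 128) hpw hlt

theorem count_filter_full {α : Type} [BEq α] [LawfulBEq α] (p : α → Bool) (a : α) (l : List α) :
    (l.filter p).count a = if p a then l.count a else 0 := by
  by_cases hp : p a = true
  · simp [hp, List.count_filter hp]
  · simp [hp]
    exact List.count_eq_zero.mpr (fun hm => hp (List.of_mem_filter hm))

theorem flatMap_congr_mem {α β : Type} (l : List α) (f g : α → List β)
    (h : ∀ x ∈ l, f x = g x) : l.flatMap f = l.flatMap g := by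
  induction l with
  | nil => rfl
  | cons x t ih =>
    rw [List.flatMap_cons, List.flatMap_cons, h x (by simp),
        ih (fun y hy => h y (by simp [hy]))]

-- ===== VERDICT (by name: the statement is the Claim_ definition above) =====
theorem solve_spec : Claim_equal_solve := by
  intro s hdom
  have hlt : ∀ c ∈ s.toList, c.toNat < 128 := by
    intro c hc
    have := List.all_eq_true.mp hdom c hc
    simp [pvDomChar] at this
    omega
  show solve s = solve_alt s
  simp only [solve, solve_alt]
  rw [PySem.List.foldl_pyRange_zero_pyGetD s.toList ' '
      (fun (acc : List Char × List Char) c =>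
        if c = 'a' ∨ c = 'e' ∨ c = 'i' ∨ c = 'o' ∨ c = 'u' then (acc.1 ++ [c], acc.2)
        else (acc.1, acc.2 ++ [c])) ([], [])]
  rw [foldl_route (fun c : Char => c = 'a' ∨ c = 'e' ∨ c = 'i' ∨ c = 'o' ∨ c = 'u')
      (fun c => [c]) s.toList [] []]
  rw [foldl_route (fun k : Nat => Char.ofNat k = 'a' ∨ Char.ofNat k = 'e' ∨ Char.ofNat k = 'i' ∨
        Char.ofNat k = 'o' ∨ Char.ofNat k = 'u')
      (fun k => List.replicate (((s.toList.foldl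
          (fun (counts : List Int) c => counts.set c.toNat (counts.getD c.toNat 0 + 1))
          (List.replicate 128 0)).getD k 0).toNat) (Char.ofNat k)) (List.range 128) [] []]
  simp only [List.nil_append, flatMap_single_filter, flatMap_single_filter_not]
  have hcnt : ∀ k ∈ List.range 128,
      ((s.toList.foldl (fun (counts : List Int) c => counts.set c.toNat (counts.getD c.toNat 0 + 1))
        (List.replicate 128 0)).getD k 0).toNat = s.toList.count (Char.ofNat k) := by
    intro k hk
    have hk' : k < 128 := List.mem_range.mp hk
    rw [counts_getD s.toList (List.replicate 128 0) (by simp) hlt k hk',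
        List.getD_replicate 0 hk']
    simp
  congr 1
  congr 1
  · -- vowel side
    rw [flatMap_congr_mem (List.range 128) _
        (fun k => List.replicate (((s.toList.filter (fun c =>
            decide (c = 'a' ∨ c = 'e' ∨ c = 'i' ∨ c = 'o' ∨ c = 'u'))).count (Char.ofNat k)))
          (Char.ofNat k)) ?_]
    · exact (counting_sort _ (fun c hc => hlt c (List.mem_of_mem_filter hc))).symm
    · intro k hk
      rw [hcnt k hk]
      by_cases hv : Char.ofNat k = 'a' ∨ Char.ofNat k = 'e' ∨ Char.ofNat k = 'i' ∨
          Char.ofNat k = 'o' ∨ Char.ofNat k = 'u' <;> simp [count_filter_full, hv]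
  · -- consonant side
    rw [flatMap_congr_mem (List.range 128) _
        (fun k => List.replicate (((s.toList.filter (fun c =>
            !decide (c = 'a' ∨ c = 'e' ∨ c = 'i' ∨ c = 'o' ∨ c = 'u'))).count (Char.ofNat k)))
          (Char.ofNat k)) ?_]
    · exact (counting_sort _ (fun c hc => hlt c (List.mem_of_mem_filter hc))).symm
    · intro k hk
      rw [hcnt k hk]
      by_cases hv : Char.ofNat k = 'a' ∨ Char.ofNat k = 'e' ∨ Char.ofNat k = 'i' ∨
          Char.ofNat k = 'o' ∨ Char.ofNat k = 'u' <;> simp [count_filter_full, hv] <;> tauto
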